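-- pv_equiv track=rewrite | github.com/fflorey/advent_of_code_2023 | 12/12b.py | replace_questionmarks
-- ===== SOURCE A (Python) =====
-- def replace_questionmarks(line, arrangement):
--     new_line = ""
--     idx = 0
--     for char in line:
--         if char == '?':
--             if arrangement[idx] == '0':
--                 new_line += '.'
--             else:
--                 new_line += '#'
--             idx += 1
--         else:
--             new_line += char
--     return new_line
-- ===== SOURCE B (Python) =====
-- def replace_questionmarks(line, arrangement):
--     parts = line.split('?')
--     new_line = parts[0]
--     for i, part in enumerate(parts[1:]):
--         new_line += ('.' if arrangement[i] == '0' else '#') + part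
--     return new_line
-- ===== Notes on version B (the rewrite author's own statement) =====
-- stated objective: simpler
-- what changed: B splits the line at '?' once and rejoins the segments with one translated arrangement bit between each pair, replacing A's per-character scan with an explicit idx counter.
import Mathlib
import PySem

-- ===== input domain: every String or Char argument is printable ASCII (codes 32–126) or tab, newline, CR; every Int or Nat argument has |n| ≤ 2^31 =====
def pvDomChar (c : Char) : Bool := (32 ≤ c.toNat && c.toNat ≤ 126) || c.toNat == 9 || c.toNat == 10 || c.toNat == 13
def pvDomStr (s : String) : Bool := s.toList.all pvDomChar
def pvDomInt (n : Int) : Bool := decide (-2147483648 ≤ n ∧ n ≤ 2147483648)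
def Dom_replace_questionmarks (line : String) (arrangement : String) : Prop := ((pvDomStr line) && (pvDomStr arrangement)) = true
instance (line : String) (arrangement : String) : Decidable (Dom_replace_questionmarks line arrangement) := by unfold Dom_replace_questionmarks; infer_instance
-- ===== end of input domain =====

-- B rebuilds the line from line.split('?') segments joined by one translated bit each,
-- instead of A's per-character scan: a simpler decomposition (objective: simpler).


-- ===== PORT A =====
-- state: (characters built so far, idx); none = the IndexError from arrangement[idx]
def stepA (arr : List Char) (st : Option (List Char × Int)) (c : Char) : Option (List Char × Int) :=
  match st with
  | none => none
  | some (acc, idx) =>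
    if c = '?' then
      match PySem.List.pyGet? arr idx with
      | none => none                    -- Python: IndexError (excluded by Pre_)
      | some b => some (acc ++ [if b = '0' then '.' else '#'], idx + 1)
    else some (acc ++ [c], idx)

def replace_questionmarks (line : String) (arrangement : String) : String :=
  match line.toList.foldl (stepA arrangement.toList) (some ([], 0)) with
  | some (acc, _) => String.ofList acc
  | none => ""                          -- Python raises here; outside Pre_

-- ===== PORT B =====
-- join the split segments, translating one arrangement bit before each segment after the first
def goB (arr : List Char) : List Char → List (List Char) → Int → Option (List Char)
  | acc, [], _ => some acc
  | acc, seg :: rest, i =>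
    match PySem.List.pyGet? arr i with
    | none => none                      -- Python: IndexError (excluded by Pre_)
    | some b => goB arr (acc ++ (if b = '0' then '.' else '#') :: seg) rest (i + 1)

def replace_questionmarks_alt (line : String) (arrangement : String) : String :=
  match line.toList.splitOn '?' with
  | [] => ""                            -- unreachable: splitOn never returns []
  | p0 :: rest =>
    match goB arrangement.toList p0 rest 0 with
    | some cs => String.ofList cs
    | none => ""                        -- Python raises here; outside Pre_

-- ===== PRECONDITION & SPEC =====
-- Pre_ excludes exactly the inputs with more '?' than arrangement bits, on which A raises IndexError.
def Pre_replace_questionmarks (line : String) (arrangement : String) : Prop :=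
  line.toList.count '?' ≤ arrangement.toList.length
instance (line : String) (arrangement : String) : Decidable (Pre_replace_questionmarks line arrangement) := by unfold Pre_replace_questionmarks; infer_instance

def pvWitness_replace_questionmarks : String × String := ("?a?b", "01")

def Spec_replace_questionmarks (line : String) (arrangement : String) (out : String) : Prop := out = replace_questionmarks_alt line arrangement
instance (line : String) (arrangement : String) (out : String) : Decidable (Spec_replace_questionmarks line arrangement out) := by unfold Spec_replace_questionmarks; infer_instance

-- ===== CLAIM (what is proved, stated in full; the proofs are below) =====
def Claim_equal_replace_questionmarks : Prop := ∀ (line : String) (arrangement : String), Dom_replace_questionmarks line arrangement → Pre_replace_questionmarks line arrangement → Spec_replace_questionmarks line arrangement (replace_questionmarks line arrangement)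

-- ===== LEMMAS AND PROOFS =====

lemma splitOn_ne_nil (a : Char) (cs : List Char) : cs.splitOn a ≠ [] := by
  unfold List.splitOn
  induction cs with
  | nil => simp [List.splitOnP_nil]
  | cons c cs ih =>
    rw [List.splitOnP_cons]
    split
    · simp
    · rcases h : List.splitOnP (fun x => x == a) cs with _ | ⟨q, l⟩
      · exact absurd h ih
      · simp [List.modifyHead]

lemma main_lemma (arr : List Char) (cs : List Char) :
    ∀ (k : Nat) (acc : List Char), cs.count '?' + k ≤ arr.length →
    cs.foldl (stepA arr) (some (acc, (k : Int))) =
      (match cs.splitOn '?' with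
       | [] => none
       | p0 :: rest =>
         (goB arr (acc ++ p0) rest (k : Int)).map
           (fun r => (r, ((k + cs.count '?' : Nat) : Int)))) := by
  induction cs with
  | nil =>
    intro k acc _
    simp [List.splitOn, List.splitOnP_nil, goB]
  | cons c cs ih =>
    intro k acc h
    by_cases hc : c = '?'
    · subst hc
      have hk : k < arr.length := by
        simp at h; omega
      have hget : PySem.List.pyGet? arr (k : Int) = some arr[k] := by
        simp [PySem.List.pyGet?_natCast, List.getElem?_eq_getElem hk]
      have h' : cs.count '?' + (k + 1) ≤ arr.length := by
        simp at h; omega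
      simp only [List.foldl_cons, stepA, hget, if_true]
      have : ((k : Int) + 1) = ((k + 1 : Nat) : Int) := by push_cast; ring
      rw [this, ih (k + 1) (acc ++ [if arr[k] = '0' then '.' else '#']) h']
      have hsplit : ('?' :: cs).splitOn '?' = [] :: cs.splitOn '?' := by
        simp [List.splitOn, List.splitOnP_cons]
      rw [hsplit]
      rcases hq : cs.splitOn '?' with _ | ⟨q0, qrest⟩
      · exact absurd hq (splitOn_ne_nil '?' cs)
      · simp only [goB, hget]
        have : acc ++ [if arr[k] = '0' then '.' else '#'] ++ q0 =
            (acc ++ []) ++ (if arr[k] = '0' then '.' else '#') :: q0 := by simp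
        rw [this]
        have hcnt : (k + ('?' :: cs).count '?' : Nat) = (k + 1 + cs.count '?' : Nat) := by
          simp [List.count_cons]; omega
        rw [hcnt]
        have : ((k : Int) + 1) = ((k + 1 : Nat) : Int) := by push_cast; ring
        rw [this]
    · have h' : cs.count '?' + k ≤ arr.length := by
        simp [hc] at h ⊢; omega
      simp only [List.foldl_cons, stepA, if_neg hc]
      rw [ih k (acc ++ [c]) h']
      have hsplit : (c :: cs).splitOn '?' = (cs.splitOn '?').modifyHead (List.cons c) := by
        simp [List.splitOn, List.splitOnP_cons, hc]
      rw [hsplit]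
      rcases hq : cs.splitOn '?' with _ | ⟨q0, qrest⟩
      · exact absurd hq (splitOn_ne_nil '?' cs)
      · simp only [List.modifyHead]
        have : acc ++ [c] ++ q0 = acc ++ c :: q0 := by simp
        rw [this]
        have hcnt : (k + (c :: cs).count '?' : Nat) = (k + cs.count '?' : Nat) := by
          simp [hc]
        rw [hcnt]

-- ===== VERDICT (by name: the statement is the Claim_ definition above) =====
theorem replace_questionmarks_spec : Claim_equal_replace_questionmarks := by
  intro line arrangement _ hpre
  unfold Spec_replace_questionmarks replace_questionmarks replace_questionmarks_alt
  have h := main_lemma arrangement.toList line.toList 0 []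
    (by simpa using hpre)
  norm_num at h
  rw [h]
  rcases hq : line.toList.splitOn '?' with _ | ⟨p0, rest⟩
  · exact absurd hq (splitOn_ne_nil '?' line.toList)
  · rcases hg : goB arrangement.toList p0 rest 0 with _ | cs <;> simp [hg]
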